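-- pv_equiv track=rewrite | github.com/spirittours/-spirittours-s-Plataform | backend/services/translation_service.py | _adjust_rtl_punctuation
-- ===== SOURCE A (Python) =====
-- def _adjust_rtl_punctuation(text: str) -> str:
--     """Adjust punctuation for RTL languages"""
--     # Swap parentheses and brackets for RTL
--     replacements = {
--         "(": ")",
--         ")": "(",
--         "[": "]",
--         "]": "[",
--         "{": "}",
--         "}": "{"
--     }
--
--     for old, new in replacements.items():
--         text = text.replace(old, f"__TEMP_{old}__")
--
--     for old, new in replacements.items():
--         text = text.replace(f"__TEMP_{old}__", new)
--
--     return text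
-- ===== SOURCE B (Python) =====
-- _RTL_TABLE = str.maketrans("()[]{}", ")(][}{")
--
-- def _adjust_rtl_punctuation(text: str) -> str:
--     """Adjust punctuation for RTL languages: swap brackets in one pass."""
--     return text.translate(_RTL_TABLE)
-- ===== Notes on version B (the rewrite author's own statement) =====
-- stated objective: simpler
-- what changed: Replaces the two sequential replace-loops with their placeholder round-trip (__TEMP_x__ markers) by a single character translation table (str.maketrans + str.translate) applied in one pass; Pre_ excludes texts that already contain a sentinel-collision site (a __TEMP_-style fragment, or a bracket followed by TEMP_ or _TEMP_, directly before an opening bracket with a __-style continuation), where A's placeholders collide with the text's own content and B's one-pass swap does not reproduce the collision.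
-- outside the precondition, e.g. on _adjust_rtl_punctuation('__TEMP_(__'): A returns '(', B returns '__TEMP_)__'; on _adjust_rtl_punctuation('x__TEMP_[__y'): A returns 'x[y', B returns 'x__TEMP_]__y'; on _adjust_rtl_punctuation('__TEMP_{__'): A returns '{', B returns '__TEMP_}__'
import Mathlib
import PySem

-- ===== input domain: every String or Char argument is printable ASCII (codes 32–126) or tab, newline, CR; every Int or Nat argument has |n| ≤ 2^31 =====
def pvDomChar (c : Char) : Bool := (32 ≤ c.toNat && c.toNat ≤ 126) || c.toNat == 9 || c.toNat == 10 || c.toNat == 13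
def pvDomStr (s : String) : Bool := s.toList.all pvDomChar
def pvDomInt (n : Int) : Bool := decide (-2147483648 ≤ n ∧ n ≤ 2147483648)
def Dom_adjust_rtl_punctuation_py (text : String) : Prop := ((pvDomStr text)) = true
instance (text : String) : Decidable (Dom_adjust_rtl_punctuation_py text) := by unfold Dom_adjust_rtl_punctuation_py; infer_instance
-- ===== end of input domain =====

-- B replaces A's two replace-loops (a placeholder round-trip through __TEMP_x__ markers)
-- by a single character-wise translation pass: simpler, one pass instead of twelve.

-- ===== PORT A =====
def adjust_rtl_punctuation_py (text : String) : String :=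
  let replacements : PySem.Dict String String :=
    PySem.Dict.ofList [("(", ")"), (")", "("), ("[", "]"), ("]", "["), ("{", "}"), ("}", "{")]
  let text1 := replacements.items.foldl
    (fun t p => PySem.Str.replace t p.1 ("__TEMP_" ++ p.1 ++ "__")) text
  let text2 := replacements.items.foldl
    (fun t p => PySem.Str.replace t ("__TEMP_" ++ p.1 ++ "__") p.2) text1
  text2

-- ===== PORT B =====
-- the translation table of Source B as a function (maketrans "()[]{}" -> ")(][}{")
def pvSwapChar (c : Char) : Char :=
  if c = '(' then ')' else if c = ')' then '('
  else if c = '[' then ']' else if c = ']' then '['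
  else if c = '{' then '}' else if c = '}' then '{' else c

def adjust_rtl_punctuation_py_alt (text : String) : String :=
  String.ofList (text.toList.map pvSwapChar)

-- ===== PRECONDITION & SPEC =====
-- input-side vocabulary of the difference region: a single left-to-right scan that looks,
-- at each position, for a sentinel-collision site "<u>X<v>" (u a "__TEMP_"-like lead-in,
-- X an opening bracket, v a "__"-like continuation); it reads the input only.
def pvUbl (X : Char) : List Char :=
  if X = '(' then ['[', ']', '{', '}'] else if X = '[' then ['{', '}'] else []
def pvVbl (X : Char) : List Char :=
  if X = '(' then [')', '[', ']', '{', '}']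
  else if X = '[' then [']', '{', '}'] else if X = '{' then ['}'] else []
def pvIsOpen (X : Char) : Bool := X = '(' || X = '[' || X = '{'
def pvVOK (X : Char) (v : List Char) : Bool :=
  match v with
  | [] => false
  | a :: rest =>
    if a = '_' then
      match rest with
      | [] => false
      | b :: _ => b = '_' || (pvVbl X).contains b
    else (pvVbl X).contains a
def pvTrigHead (s : List Char) : Bool :=
  (match s with
   | '_' :: '_' :: 'T' :: 'E' :: 'M' :: 'P' :: '_' :: X :: v => pvIsOpen X && pvVOK X v
   | _ => false) ||
  (match s with
   | b :: 'T' :: 'E' :: 'M' :: 'P' :: '_' :: X :: v => (pvUbl X).contains b && pvVOK X v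
   | _ => false) ||
  (match s with
   | b :: '_' :: 'T' :: 'E' :: 'M' :: 'P' :: '_' :: X :: v => (pvUbl X).contains b && pvVOK X v
   | _ => false)
def pvScan : List Char → Bool
  | [] => false
  | c :: t => pvTrigHead (c :: t) || pvScan t
def pvLastN (l : List Char) : List Char := l.drop (l.length - 12)
def pvPush (w : List Char) (c : Char) : List Char := pvLastN (w ++ [c])
def pvStepF (acc : Bool × List Char) (c : Char) : Bool × List Char :=
  let w' := pvPush acc.2 c
  (acc.1 || pvScan w', w')
def pvScanF (cs : List Char) : Bool := (cs.foldl pvStepF (false, [])).1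

-- Pre_ excludes texts that already contain a sentinel-collision site (a "__TEMP_"-style
-- fragment — or a bracket followed by "TEMP_"/"_TEMP_" — directly before an opening bracket
-- ( [ { with a "__"-style continuation): there A's own placeholders collide with the
-- text's content and fold parts of it away, which B's single-pass swap does not
-- reproduce (see the cited examples, e.g. the input 'x__TEMP_[__y').
def Pre_adjust_rtl_punctuation_py (text : String) : Prop :=
  pvScanF text.toList = false
instance (text : String) : Decidable (Pre_adjust_rtl_punctuation_py text) := by
  unfold Pre_adjust_rtl_punctuation_py; infer_instance

def pvWitness_adjust_rtl_punctuation_py : String := "hello (world) [RTL] {x}"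

def Spec_adjust_rtl_punctuation_py (text : String) (out : String) : Prop :=
  out = adjust_rtl_punctuation_py_alt text
instance (text : String) (out : String) : Decidable (Spec_adjust_rtl_punctuation_py text out) := by
  unfold Spec_adjust_rtl_punctuation_py; infer_instance

-- ===== CLAIM =====
def Claim_equal_adjust_rtl_punctuation_py : Prop :=
  ∀ (text : String), Dom_adjust_rtl_punctuation_py text →
    Pre_adjust_rtl_punctuation_py text →
    Spec_adjust_rtl_punctuation_py text (adjust_rtl_punctuation_py text)

-- ===== LEMMAS AND PROOFS =====

-- ---------- proof-side vocabulary ----------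
-- building blocks of the difference region (literal character lists, input-side only)
def pvTempl : List Char := ['T', 'E', 'M', 'P', '_']          -- "TEMP_"
def pvSent : List Char := ['_', '_', 'T', 'E', 'M', 'P', '_'] -- "__TEMP_"
-- all trigger substrings u ++ X :: v for one opening bracket X
def pvMkPats (X : Char) (ub vb : List Char) : List (List Char) :=
  let us := pvSent :: ub.flatMap (fun b => [b :: pvTempl, b :: '_' :: pvTempl])
  let vs := ['_', '_'] :: vb.flatMap (fun b => [[b], ['_', b]])
  us.flatMap (fun u => vs.map (fun v => u ++ X :: v))
def pvPats : List (List Char) :=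
  pvMkPats '(' ['[', ']', '{', '}'] [')', '[', ']', '{', '}'] ++
  pvMkPats '[' ['{', '}'] [']', '{', '}'] ++
  pvMkPats '{' [] ['}']

-- pvScanF is the window scan; these connect it to the pattern list pvPats
set_option maxRecDepth 100000 in
lemma pvPats_trigHead : ∀ p ∈ pvPats, pvTrigHead p = true := by decide
set_option maxRecDepth 100000 in
lemma pvPats_len : ∀ p ∈ pvPats, p.length ≤ 12 := by decide

lemma pvScan_of_suffix {s w : List Char} (hsuf : s <:+ w) (h : pvTrigHead s = true) :
    pvScan w = true := by
  induction w with
  | nil =>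
    rw [List.suffix_nil.mp hsuf] at h
    exact absurd h (by decide)
  | cons c t ih =>
    rcases List.suffix_cons_iff.mp hsuf with rfl | hsuf'
    · simp [pvScan, h]
    · simp [pvScan, ih hsuf']

lemma pvLastN_len (l : List Char) : (pvLastN l).length ≤ 12 := by
  simp only [pvLastN, List.length_drop]
  omega

lemma pvLastN_of_le {l : List Char} (h : l.length ≤ 12) : pvLastN l = l := by
  unfold pvLastN
  rw [Nat.sub_eq_zero_of_le h, List.drop_zero]

lemma pvLastN_append_of_ge {x y : List Char} (h : 12 ≤ y.length) :
    pvLastN (x ++ y) = pvLastN y := by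
  unfold pvLastN
  have harith : x.length + y.length - 12 = x.length + (y.length - 12) := by omega
  rw [List.length_append, harith, List.drop_append]
  have h1 : List.drop (x.length + (y.length - 12)) x = [] := List.drop_eq_nil_of_le (by omega)
  have h2 : x.length + (y.length - 12) - x.length = y.length - 12 := by omega
  rw [h1, h2, List.nil_append]

lemma pvLastN_absorb (u v : List Char) : pvLastN (pvLastN u ++ v) = pvLastN (u ++ v) := by
  by_cases h : u.length ≤ 12
  · rw [pvLastN_of_le h]
  · have h12 : 12 ≤ (u.drop (u.length - 12) ++ v).length := by
      simp
      omega
    have hsplit : u ++ v = u.take (u.length - 12) ++ (u.drop (u.length - 12) ++ v) := by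
      rw [← List.append_assoc, List.take_append_drop]
    rw [hsplit, pvLastN_append_of_ge h12]
    rfl

lemma pvSuffix_lastN {p u : List Char} (hsuf : p <:+ u) (hlen : p.length ≤ 12) :
    p <:+ pvLastN u := by
  by_cases h : u.length ≤ 12
  · rw [pvLastN_of_le h]; exact hsuf
  · obtain ⟨a, rfl⟩ := hsuf
    have hk : (a ++ p).length - 12 ≤ a.length := by
      simp only [List.length_append]
      omega
    unfold pvLastN
    rw [List.drop_append_of_le_length hk]
    exact ⟨a.drop _, rfl⟩

lemma pvWin : ∀ (l : List Char) (b : Bool) (w : List Char), w.length ≤ 12 →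
    (l.foldl pvStepF (b, w)).2 = pvLastN (w ++ l) := by
  intro l
  induction l with
  | nil =>
    intro b w hw
    simpa using (pvLastN_of_le hw).symm
  | cons c t ih =>
    intro b w hw
    rw [List.foldl_cons]
    have hstep : pvStepF (b, w) c = (b || pvScan (pvPush w c), pvPush w c) := rfl
    rw [hstep]
    rw [ih (b || pvScan (pvPush w c)) (pvPush w c) (by unfold pvPush; exact pvLastN_len _)]
    show pvLastN (pvPush w c ++ t) = pvLastN (w ++ c :: t)
    unfold pvPush
    rw [pvLastN_absorb]
    simp

lemma pvFlag : ∀ (l : List Char) (acc : Bool × List Char), acc.1 = true →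
    (l.foldl pvStepF acc).1 = true := by
  intro l
  induction l with
  | nil => intro acc h; simpa using h
  | cons c t ih =>
    intro acc h
    rw [List.foldl_cons]
    exact ih _ (by simp [pvStepF, h])

lemma pvD_of_pat {cs : List Char} (hex : ∃ p ∈ pvPats, p <:+: cs) :
    pvScanF cs = true := by
  obtain ⟨p, hp, hinf⟩ := hex
  obtain ⟨a, b, rfl⟩ := hinf
  have hlen := pvPats_len p hp
  have htrig := pvPats_trigHead p hp
  obtain ⟨q, c0, rfl⟩ := (List.eq_nil_or_concat p).resolve_left (by
    intro h
    rw [h] at hp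
    exact absurd hp (by decide))
  simp only [List.concat_eq_append] at hp hlen htrig ⊢
  unfold pvScanF
  simp only [List.append_assoc, List.singleton_append]
  rw [List.foldl_append, List.foldl_append, List.foldl_cons]
  apply pvFlag
  set accA := List.foldl pvStepF (false, ([] : List Char)) a with hA
  set accQ := List.foldl pvStepF accA q with hQ
  have e1 : accA.2 = pvLastN a := by
    have := pvWin a false [] (by simp)
    simpa [hA] using this
  have h2 : accQ.2 = pvLastN (a ++ q) := by
    have e2 := pvWin q accA.1 accA.2 (by rw [e1]; exact pvLastN_len a)
    have heta : (accA.1, accA.2) = accA := rfl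
    rw [heta, e1] at e2
    rw [hQ, e2, pvLastN_absorb]
  have hw' : pvPush accQ.2 c0 = pvLastN (a ++ (q ++ [c0])) := by
    unfold pvPush
    rw [h2, pvLastN_absorb]
    simp
  have hscan : pvScan (pvPush accQ.2 c0) = true := by
    rw [hw']
    exact pvScan_of_suffix (pvSuffix_lastN ⟨a, rfl⟩ hlen) htrig
  show (accQ.1 || pvScan (pvPush accQ.2 c0)) = true
  rw [hscan, Bool.or_true]

def pvBr : List Char := ['(', ')', '[', ']', '{', '}']
def pvBlock (o : Char) : List Char := ['_', '_', 'T', 'E', 'M', 'P', '_', o, '_', '_']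

inductive PvRole | raw | blk | sw
deriving DecidableEq

def pvRole (sws : List Char) (c : Char) : PvRole :=
  if c ∈ sws then .sw else if c ∈ pvBr then .blk else .raw

def pvChunk (r : Char → PvRole) (c : Char) : List Char :=
  match r c with
  | .raw => [c]
  | .blk => pvBlock c
  | .sw => [pvSwapChar c]

def pvImg (r : Char → PvRole) (cs : List Char) : List Char := cs.flatMap (pvChunk r)

-- ---------- a fuel-free model of PySem.Chars.replace for a nonempty pattern ----------
def pvRep (p0 : Char) (pt r : List Char) : List Char → List Char
  | [] => []
  | c :: t =>
    if (p0 :: pt) <+: (c :: t) then r ++ pvRep p0 pt r (t.drop pt.length)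
    else c :: pvRep p0 pt r t
termination_by l => l.length
decreasing_by
  · simp only [List.length_drop, List.length_cons]; omega
  · simp only [List.length_cons]; omega

lemma pvRep_nil (p0 : Char) (pt r : List Char) : pvRep p0 pt r [] = [] := by
  rw [pvRep]

lemma pvRep_pos (p0 : Char) (pt r : List Char) {c : Char} {t : List Char}
    (h : (p0 :: pt) <+: (c :: t)) :
    pvRep p0 pt r (c :: t) = r ++ pvRep p0 pt r (t.drop pt.length) := by
  rw [pvRep, if_pos h]

lemma pvRep_neg (p0 : Char) (pt r : List Char) {c : Char} {t : List Char}
    (h : ¬ (p0 :: pt) <+: (c :: t)) :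
    pvRep p0 pt r (c :: t) = c :: pvRep p0 pt r t := by
  rw [pvRep, if_neg h]

lemma pvGo (p0 : Char) (pt r : List Char) :
    ∀ (fuel : Nat) (l acc : List Char), l.length ≤ fuel →
      PySem.Chars.replace.go (p0 :: pt) r fuel l acc = acc.reverse ++ pvRep p0 pt r l := by
  intro fuel
  induction fuel with
  | zero =>
    intro l acc hl
    have : l = [] := List.length_eq_zero_iff.mp (Nat.le_zero.mp hl)
    subst this
    simp [PySem.Chars.replace.go, pvRep_nil]
  | succ n ih =>
    intro l acc hl
    cases l with
    | nil => simp [PySem.Chars.replace.go, pvRep_nil]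
    | cons c t =>
      rw [PySem.Chars.replace.go]
      by_cases h : (p0 :: pt) <+: (c :: t)
      · rw [if_pos (List.isPrefixOf_iff_prefix.mpr h)]
        have hlen : ((c :: t).drop (p0 :: pt).length).length ≤ n := by
          simp only [List.length_drop, List.length_cons] at *
          omega
        rw [ih _ _ hlen, pvRep_pos p0 pt r h]
        simp
      · rw [if_neg (fun hb => h (List.isPrefixOf_iff_prefix.mp hb))]
        have hlen : t.length ≤ n := by simp at hl; omega
        rw [ih _ _ hlen, pvRep_neg p0 pt r h]
        simp

lemma pvReplace_eq (p0 : Char) (pt r l : List Char) :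
    PySem.Chars.replace l (p0 :: pt) r = pvRep p0 pt r l := by
  rw [PySem.Chars.replace]
  simp only [List.isEmpty_cons, if_false, Bool.false_eq_true]
  exact (pvGo p0 pt r l.length l [] le_rfl).trans (by simp)

lemma pvRep_append (p0 : Char) (pt r : List Char) (x y : List Char)
    (H : ∀ i, i < x.length → ¬ ((p0 :: pt) <+: (x ++ y).drop i)) :
    pvRep p0 pt r (x ++ y) = x ++ pvRep p0 pt r y := by
  induction x with
  | nil => simp
  | cons c x' ih =>
    have h0 : ¬ ((p0 :: pt) <+: (c :: (x' ++ y))) := by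
      have := H 0 (by simp)
      simpa using this
    have H' : ∀ i, i < x'.length → ¬ ((p0 :: pt) <+: (x' ++ y).drop i) := by
      intro i hi
      have := H (i + 1) (by simp; omega)
      simpa using this
    rw [List.cons_append, pvRep_neg p0 pt r h0, ih H']
    simp

lemma pvRep_single (a : Char) (r : List Char) (l : List Char) :
    pvRep a [] r l = l.flatMap (fun c => if c = a then r else [c]) := by
  induction l with
  | nil => simp [pvRep_nil]
  | cons c t ih =>
    by_cases h : a = c
    · subst h
      rw [pvRep_pos a [] r (by simp [List.cons_prefix_cons])]
      simp [ih]
    · rw [pvRep_neg a [] r (by simp [List.cons_prefix_cons]; exact h)]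
      have hc : ¬ (c = a) := fun he => h he.symm
      simp [hc, ih]

-- ---------- role bookkeeping ----------
lemma pvRole_sw_iff (sws : List Char) (c : Char) : pvRole sws c = .sw ↔ c ∈ sws := by
  unfold pvRole; split_ifs <;> simp_all

lemma pvRole_blk_iff (sws : List Char) (c : Char) :
    pvRole sws c = .blk ↔ c ∉ sws ∧ c ∈ pvBr := by
  unfold pvRole; split_ifs <;> simp_all

lemma pvRole_raw_iff (sws : List Char) (c : Char) :
    pvRole sws c = .raw ↔ c ∉ sws ∧ c ∉ pvBr := by
  unfold pvRole; split_ifs <;> simp_all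

lemma pvRole_ne_raw (sws : List Char) (hs : sws ⊆ pvBr) (c : Char)
    (h : pvRole sws c ≠ .raw) : c ∈ pvBr := by
  unfold pvRole at h; split_ifs at h with h1 h2
  · exact hs h1
  · exact h2
  · exact absurd rfl h

lemma pvSwap_mem : ∀ c ∈ pvBr, pvSwapChar c ∈ pvBr := by
  intro c hc; fin_cases hc <;> decide
lemma pvSwap_invol : ∀ c ∈ pvBr, pvSwapChar (pvSwapChar c) = c := by
  intro c hc; fin_cases hc <;> decide
lemma pvBr_ne_us : ∀ c ∈ pvBr, c ≠ '_' := by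
  intro c hc; fin_cases hc <;> decide
lemma pvSwap_ne_us : ∀ c ∈ pvBr, pvSwapChar c ≠ '_' := by
  intro c hc; fin_cases hc <;> decide
lemma pvSwap_id {c : Char} (h : c ∉ pvBr) : pvSwapChar c = c := by
  simp only [pvBr, List.mem_cons, List.not_mem_nil, or_false, not_or] at h
  unfold pvSwapChar
  split_ifs <;> simp_all

-- ---------- head-shape lemmas for pvImg ----------
lemma pvLit {r : Char → PvRole} (Hbr : ∀ c, r c ≠ .raw → c ∈ pvBr) {a : Char}
    (ha1 : a ∉ pvBr) (ha2 : a ≠ '_') :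
    ∀ {w t : List Char}, (a :: w) <+: pvImg r t → ∃ t', t = a :: t' ∧ w <+: pvImg r t' := by
  intro w t h
  cases t with
  | nil => simp [pvImg] at h
  | cons c t' =>
    have himg : pvImg r (c :: t') = pvChunk r c ++ pvImg r t' := by simp [pvImg]
    rw [himg] at h
    cases hrc : r c with
    | raw =>
      simp only [pvChunk, hrc, List.cons_append, List.nil_append] at h
      obtain ⟨h1, h2⟩ := List.cons_prefix_cons.mp h
      exact ⟨t', by rw [h1], h2⟩
    | blk =>
      have hcb : c ∈ pvBr := Hbr c (by simp [hrc])
      simp only [pvChunk, hrc, pvBlock, List.cons_append] at h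
      obtain ⟨h1, _⟩ := List.cons_prefix_cons.mp h
      exact absurd h1 ha2
    | sw =>
      have hcb : c ∈ pvBr := Hbr c (by simp [hrc])
      simp only [pvChunk, hrc, List.cons_append, List.nil_append] at h
      obtain ⟨h1, _⟩ := List.cons_prefix_cons.mp h
      exact absurd (h1 ▸ pvSwap_mem c hcb) ha1

lemma pvUT {r : Char → PvRole} (Hbr : ∀ c, r c ≠ .raw → c ∈ pvBr) :
    ∀ {w t : List Char}, ('_' :: 'T' :: w) <+: pvImg r t →
      ∃ t', t = '_' :: t' ∧ ('T' :: w) <+: pvImg r t' := by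
  intro w t h
  cases t with
  | nil => simp [pvImg] at h
  | cons c t' =>
    have himg : pvImg r (c :: t') = pvChunk r c ++ pvImg r t' := by simp [pvImg]
    rw [himg] at h
    cases hrc : r c with
    | raw =>
      simp only [pvChunk, hrc, List.cons_append, List.nil_append] at h
      obtain ⟨h1, h2⟩ := List.cons_prefix_cons.mp h
      exact ⟨t', by rw [h1], h2⟩
    | blk =>
      simp only [pvChunk, hrc, pvBlock, List.cons_append] at h
      obtain ⟨_, h2⟩ := List.cons_prefix_cons.mp h
      obtain ⟨h3, _⟩ := List.cons_prefix_cons.mp h2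
      exact absurd h3 (by decide)
    | sw =>
      have hcb : c ∈ pvBr := Hbr c (by simp [hrc])
      simp only [pvChunk, hrc, List.cons_append, List.nil_append] at h
      obtain ⟨h1, _⟩ := List.cons_prefix_cons.mp h
      exact absurd h1.symm (pvSwap_ne_us c hcb)

lemma pvUB {r : Char → PvRole} (Hbr : ∀ c, r c ≠ .raw → c ∈ pvBr) {o : Char}
    (ho : o ∈ pvBr) :
    ∀ {w t : List Char}, ('_' :: o :: w) <+: pvImg r t →
      ∃ t', t = '_' :: t' ∧ (o :: w) <+: pvImg r t' := by
  intro w t h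
  have ho' : o ≠ '_' := pvBr_ne_us o ho
  cases t with
  | nil => simp [pvImg] at h
  | cons c t' =>
    have himg : pvImg r (c :: t') = pvChunk r c ++ pvImg r t' := by simp [pvImg]
    rw [himg] at h
    cases hrc : r c with
    | raw =>
      simp only [pvChunk, hrc, List.cons_append, List.nil_append] at h
      obtain ⟨h1, h2⟩ := List.cons_prefix_cons.mp h
      exact ⟨t', by rw [h1], h2⟩
    | blk =>
      simp only [pvChunk, hrc, pvBlock, List.cons_append] at h
      obtain ⟨_, h2⟩ := List.cons_prefix_cons.mp h
      obtain ⟨h3, _⟩ := List.cons_prefix_cons.mp h2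
      exact absurd h3 ho'
    | sw =>
      have hcb : c ∈ pvBr := Hbr c (by simp [hrc])
      simp only [pvChunk, hrc, List.cons_append, List.nil_append] at h
      obtain ⟨h1, _⟩ := List.cons_prefix_cons.mp h
      exact absurd h1.symm (pvSwap_ne_us c hcb)

lemma pvOStep {r : Char → PvRole} (Hbr : ∀ c, r c ≠ .raw → c ∈ pvBr) {o : Char}
    (ho : o ∈ pvBr) (hro : r o = .blk) :
    ∀ {w t : List Char}, (o :: w) <+: pvImg r t →
      ∃ m, t = pvSwapChar o :: m ∧ r (pvSwapChar o) = .sw ∧ w <+: pvImg r m := by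
  intro w t h
  have ho' : o ≠ '_' := pvBr_ne_us o ho
  cases t with
  | nil => simp [pvImg] at h
  | cons c t' =>
    have himg : pvImg r (c :: t') = pvChunk r c ++ pvImg r t' := by simp [pvImg]
    rw [himg] at h
    cases hrc : r c with
    | raw =>
      simp only [pvChunk, hrc, List.cons_append, List.nil_append] at h
      obtain ⟨h1, _⟩ := List.cons_prefix_cons.mp h
      rw [← h1] at hrc
      rw [hrc] at hro
      exact absurd hro (by simp)
    | blk =>
      simp only [pvChunk, hrc, pvBlock, List.cons_append] at h
      obtain ⟨h1, _⟩ := List.cons_prefix_cons.mp h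
      exact absurd h1 ho'
    | sw =>
      have hcb : c ∈ pvBr := Hbr c (by simp [hrc])
      simp only [pvChunk, hrc, List.cons_append, List.nil_append] at h
      obtain ⟨h1, h2⟩ := List.cons_prefix_cons.mp h
      have hc : c = pvSwapChar o := by rw [h1, pvSwap_invol c hcb]
      subst hc
      exact ⟨t', rfl, hrc, h2⟩

lemma pvLook {r : Char → PvRole} (Hbr : ∀ c, r c ≠ .raw → c ∈ pvBr) {o : Char}
    (ho : o ∈ pvBr) (hro : r o = .blk) {w t : List Char}
    (h : (pvTempl ++ o :: '_' :: '_' :: w) <+: pvImg r t) :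
    ∃ m, t = 'T' :: 'E' :: 'M' :: 'P' :: '_' :: pvSwapChar o :: m ∧
      r (pvSwapChar o) = .sw ∧ ['_', '_'] <+: pvImg r m := by
  simp only [pvTempl, List.cons_append, List.nil_append] at h
  obtain ⟨t1, rfl, h1⟩ := pvLit (a := 'T') Hbr (by decide) (by decide) h
  obtain ⟨t2, rfl, h2⟩ := pvLit (a := 'E') Hbr (by decide) (by decide) h1
  obtain ⟨t3, rfl, h3⟩ := pvLit (a := 'M') Hbr (by decide) (by decide) h2
  obtain ⟨t4, rfl, h4⟩ := pvLit (a := 'P') Hbr (by decide) (by decide) h3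
  obtain ⟨t5, rfl, h5⟩ := pvUB Hbr ho h4
  obtain ⟨m, rfl, hsw, h6⟩ := pvOStep Hbr ho hro h5
  refine ⟨m, rfl, hsw, ?_⟩
  exact (List.prefix_append ['_', '_'] w).trans h6

lemma pvVShape {r : Char → PvRole} (Hbr : ∀ c, r c ≠ .raw → c ∈ pvBr) {m : List Char}
    (h : ['_', '_'] <+: pvImg r m) :
    (∃ k, m = '_' :: '_' :: k) ∨
    (∃ b k, m = '_' :: b :: k ∧ r b = .blk ∧ b ∈ pvBr) ∨
    (∃ b k, m = b :: k ∧ r b = .blk ∧ b ∈ pvBr) := by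
  cases m with
  | nil => simp [pvImg] at h
  | cons c m' =>
    have himg : pvImg r (c :: m') = pvChunk r c ++ pvImg r m' := by simp [pvImg]
    rw [himg] at h
    cases hrc : r c with
    | blk => exact Or.inr (Or.inr ⟨c, m', rfl, hrc, Hbr c (by simp [hrc])⟩)
    | sw =>
      have hcb : c ∈ pvBr := Hbr c (by simp [hrc])
      simp only [pvChunk, hrc, List.cons_append, List.nil_append] at h
      obtain ⟨h1, _⟩ := List.cons_prefix_cons.mp h
      exact absurd h1.symm (pvSwap_ne_us c hcb)
    | raw =>
      simp only [pvChunk, hrc, List.cons_append, List.nil_append] at h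
      obtain ⟨h1, h2⟩ := List.cons_prefix_cons.mp h
      subst h1
      cases m' with
      | nil => simp [pvImg] at h2
      | cons d m'' =>
        have himg2 : pvImg r (d :: m'') = pvChunk r d ++ pvImg r m'' := by simp [pvImg]
        rw [himg2] at h2
        cases hrd : r d with
        | blk => exact Or.inr (Or.inl ⟨d, m'', rfl, hrd, Hbr d (by simp [hrd])⟩)
        | sw =>
          have hdb : d ∈ pvBr := Hbr d (by simp [hrd])
          simp only [pvChunk, hrd, List.cons_append, List.nil_append] at h2
          obtain ⟨h3, _⟩ := List.cons_prefix_cons.mp h2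
          exact absurd h3.symm (pvSwap_ne_us d hdb)
        | raw =>
          simp only [pvChunk, hrd, List.cons_append, List.nil_append] at h2
          obtain ⟨h3, _⟩ := List.cons_prefix_cons.mp h2
          subst h3
          exact Or.inl ⟨m'', rfl⟩

-- ---------- triggers ----------
def pvHeadTrig (r : Char → PvRole) (o : Char) (s : List Char) : Prop :=
  ∃ m, (['_', '_'] <+: pvImg r m) ∧
    (s = pvSent ++ pvSwapChar o :: m ∨
     ∃ b, r b = .blk ∧ b ≠ o ∧ b ∈ pvBr ∧
       (s = b :: (pvTempl ++ pvSwapChar o :: m) ∨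
        s = b :: '_' :: (pvTempl ++ pvSwapChar o :: m)))

lemma pvBlockNoMatch (c o : Char) (hc : c ∈ pvBr) (hco : c ≠ o) (y : List Char)
    (H8 : ¬ ((pvTempl ++ o :: '_' :: '_' :: []) <+: y))
    (H9 : ¬ (('_' :: pvTempl ++ o :: '_' :: '_' :: []) <+: y)) :
    ∀ i, i < 10 → ¬ (pvBlock o <+: (pvBlock c ++ y).drop i) := by
  intro i hi h
  have hco' : ¬ (o = c) := fun he => hco he.symm
  have H8' : ¬ (['T', 'E', 'M', 'P', '_', o, '_', '_'] <+: y) := by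
    simpa [pvTempl] using H8
  have H9' : ¬ (['_', 'T', 'E', 'M', 'P', '_', o, '_', '_'] <+: y) := by
    simpa [pvTempl] using H9
  interval_cases i <;>
    simp only [pvBlock, List.cons_append, List.nil_append, List.drop_zero,
      List.drop_succ_cons, List.cons_prefix_cons] at h <;>
    simp_all

-- ---------- the main step lemma (one phase-2 replace) ----------
lemma pvStep (sws : List Char) (hs : sws ⊆ pvBr) (o : Char) (ho : o ∈ pvBr)
    (hos : o ∉ sws) (cs : List Char)
    (Hsafe : pvRole sws (pvSwapChar o) = .sw →
      ∀ s, s <:+ cs → ¬ pvHeadTrig (pvRole sws) o s) :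
    pvRep '_' ['_', 'T', 'E', 'M', 'P', '_', o, '_', '_'] [pvSwapChar o]
      (pvImg (pvRole sws) cs) = pvImg (pvRole (o :: sws)) cs := by
  have Hbr : ∀ c, pvRole sws c ≠ .raw → c ∈ pvBr := pvRole_ne_raw sws hs
  have hro : pvRole sws o = .blk := (pvRole_blk_iff sws o).mpr ⟨hos, ho⟩
  have hblock : ('_' :: ['_', 'T', 'E', 'M', 'P', '_', o, '_', '_']) = pvBlock o := by
    simp [pvBlock]
  revert Hsafe
  induction cs with
  | nil => intro _; simp [pvImg, pvRep_nil]
  | cons c t ih =>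
    intro Hsafe
    have Hsafe_t : pvRole sws (pvSwapChar o) = .sw →
        ∀ s, s <:+ t → ¬ pvHeadTrig (pvRole sws) o s := by
      intro ha s hsuf
      exact Hsafe ha s (hsuf.trans (List.suffix_cons c t))
    have IH := ih Hsafe_t
    have himg : pvImg (pvRole sws) (c :: t) = pvChunk (pvRole sws) c ++ pvImg (pvRole sws) t := by
      simp [pvImg]
    have himg' : pvImg (pvRole (o :: sws)) (c :: t)
        = pvChunk (pvRole (o :: sws)) c ++ pvImg (pvRole (o :: sws)) t := by
      simp [pvImg]
    rw [himg, himg']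
    by_cases hc : c = o
    · subst hc
      have hch : pvChunk (pvRole sws) c = pvBlock c := by simp [pvChunk, hro]
      have hsw' : pvRole (c :: sws) c = PvRole.sw := (pvRole_sw_iff _ _).mpr (by simp)
      have hch' : pvChunk (pvRole (c :: sws)) c = [pvSwapChar c] := by simp [pvChunk, hsw']
      rw [hch, hch']
      rw [show pvBlock c ++ pvImg (pvRole sws) t
            = '_' :: (['_', 'T', 'E', 'M', 'P', '_', c, '_', '_'] ++ pvImg (pvRole sws) t) by
          rw [← hblock]; simp]
      rw [pvRep_pos _ _ _ (List.cons_prefix_cons.mpr ⟨rfl, List.prefix_append _ _⟩)]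
      rw [List.drop_left]
      rw [IH]
    · cases hrc : pvRole sws c with
      | raw =>
        have hch : pvChunk (pvRole sws) c = [c] := by simp [pvChunk, hrc]
        have hcnbr : c ∉ pvBr := ((pvRole_raw_iff sws c).mp hrc).2
        have hcns : c ∉ sws := ((pvRole_raw_iff sws c).mp hrc).1
        have hch' : pvChunk (pvRole (o :: sws)) c = [c] := by
          have : pvRole (o :: sws) c = .raw := by
            unfold pvRole
            rw [if_neg (by simp [hc, hcns]), if_neg hcnbr]
          simp [pvChunk, this]
        rw [hch, hch']
        by_cases hp : ('_' :: ['_', 'T', 'E', 'M', 'P', '_', o, '_', '_']) <+: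
            ([c] ++ pvImg (pvRole sws) t)
        · exfalso
          rw [List.cons_append, List.nil_append] at hp
          obtain ⟨hc1, hp2⟩ := List.cons_prefix_cons.mp hp
          -- hp2 : ['_','T','E','M','P','_',o,'_','_'] <+: pvImg (pvRole sws) t
          obtain ⟨t1, ht1, hp3⟩ := pvUT Hbr (by
            simpa using hp2)
          obtain ⟨m, ht2, hsw, hv⟩ := pvLook Hbr ho hro (w := []) (by
            simpa [pvTempl] using hp3)
          apply Hsafe hsw (c :: t) (List.suffix_refl _)
          refine ⟨m, hv, Or.inl ?_⟩
          rw [← hc1, ht1, ht2]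
          simp [pvSent]
        · simp only [List.cons_append, List.nil_append]
          rw [pvRep_neg _ _ _ (by simpa using hp)]
          rw [IH]
      | sw =>
        have hcb : c ∈ pvBr := Hbr c (by simp [hrc])
        have hch : pvChunk (pvRole sws) c = [pvSwapChar c] := by simp [pvChunk, hrc]
        have hch' : pvChunk (pvRole (o :: sws)) c = [pvSwapChar c] := by
          have : pvRole (o :: sws) c = .sw :=
            (pvRole_sw_iff _ _).mpr (by simp [List.mem_cons]; exact Or.inr ((pvRole_sw_iff _ _).mp hrc))
          simp [pvChunk, this]
        rw [hch, hch']
        simp only [List.cons_append, List.nil_append]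
        rw [pvRep_neg _ _ _ (by
          intro hpre
          exact (pvSwap_ne_us c hcb) (List.cons_prefix_cons.mp hpre).1.symm)]
        rw [IH]
      | blk =>
        have hcb : c ∈ pvBr := Hbr c (by simp [hrc])
        have hcns : c ∉ sws := ((pvRole_blk_iff _ _).mp hrc).1
        have hch : pvChunk (pvRole sws) c = pvBlock c := by simp [pvChunk, hrc]
        have hch' : pvChunk (pvRole (o :: sws)) c = pvBlock c := by
          have : pvRole (o :: sws) c = .blk :=
            (pvRole_blk_iff _ _).mpr ⟨by simp [hc, hcns], hcb⟩
          simp [pvChunk, this]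
        rw [hch, hch']
        have H8 : ¬ ((pvTempl ++ o :: '_' :: '_' :: []) <+: pvImg (pvRole sws) t) := by
          intro hpre
          obtain ⟨m, ht2, hsw, hv⟩ := pvLook Hbr ho hro (w := []) hpre
          apply Hsafe hsw (c :: t) (List.suffix_refl _)
          exact ⟨m, hv, Or.inr ⟨c, hrc, hc, hcb, Or.inl (by rw [ht2]; simp [pvTempl])⟩⟩
        have H9 : ¬ (('_' :: pvTempl ++ o :: '_' :: '_' :: []) <+: pvImg (pvRole sws) t) := by
          intro hpre
          obtain ⟨t1, ht1, hp3⟩ := pvUT Hbr (by simpa [pvTempl] using hpre)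
          obtain ⟨m, ht2, hsw, hv⟩ := pvLook Hbr ho hro (w := []) (by
            simpa [pvTempl] using hp3)
          apply Hsafe hsw (c :: t) (List.suffix_refl _)
          exact ⟨m, hv, Or.inr ⟨c, hrc, hc, hcb,
            Or.inr (by rw [ht1, ht2]; simp [pvTempl])⟩⟩
        rw [pvRep_append _ _ _ _ _ (by
          intro i hilt
          have hlen : (pvBlock c).length = 10 := by simp [pvBlock]
          rw [hlen] at hilt
          rw [show ('_' :: ['_', 'T', 'E', 'M', 'P', '_', o, '_', '_'] : List Char) = pvBlock o
            from hblock]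
          exact pvBlockNoMatch c o hcb hc _ H8 H9 i hilt)]
        rw [IH]

-- ---------- triggers are inside D_ ----------
lemma mem_pvMkPats {X : Char} {u v : List Char} (ub vb : List Char)
    (hu : u = pvSent ∨ ∃ b ∈ ub, u = b :: pvTempl ∨ u = b :: '_' :: pvTempl)
    (hv : v = ['_', '_'] ∨ ∃ b ∈ vb, v = [b] ∨ v = ['_', b]) :
    (u ++ X :: v) ∈ pvMkPats X ub vb := by
  have hu' : u ∈ (pvSent :: ub.flatMap (fun b => [b :: pvTempl, b :: '_' :: pvTempl])) := by
    rcases hu with rfl | ⟨b, hb, rfl | rfl⟩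
    · exact List.mem_cons_self ..
    · exact List.mem_cons_of_mem _ (List.mem_flatMap.mpr ⟨b, hb, by simp⟩)
    · exact List.mem_cons_of_mem _ (List.mem_flatMap.mpr ⟨b, hb, by simp⟩)
  have hv' : v ∈ (['_', '_'] :: vb.flatMap (fun b => [[b], ['_', b]])) := by
    rcases hv with rfl | ⟨b, hb, rfl | rfl⟩
    · exact List.mem_cons_self ..
    · exact List.mem_cons_of_mem _ (List.mem_flatMap.mpr ⟨b, hb, by simp⟩)
    · exact List.mem_cons_of_mem _ (List.mem_flatMap.mpr ⟨b, hb, by simp⟩)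
  unfold pvMkPats
  exact List.mem_flatMap.mpr ⟨u, hu', List.mem_map.mpr ⟨v, hv', rfl⟩⟩

lemma pvTrig_to_D (sws : List Char) (hs : sws ⊆ pvBr) (o X : Char)
    (hX : pvSwapChar o = X) (ub vb : List Char)
    (hub : ∀ b, b ∈ pvBr → b ∉ sws → b ≠ o → b ∈ ub)
    (hvb : ∀ b, b ∈ pvBr → b ∉ sws → b ∈ vb)
    (hmem : ∀ p ∈ pvMkPats X ub vb, p ∈ pvPats)
    (cs : List Char) (hD : ¬ ∃ p ∈ pvPats, p <:+: cs) :
    ∀ s, s <:+ cs → ¬ pvHeadTrig (pvRole sws) o s := by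
  intro s hs' ht
  obtain ⟨m, hv, hform⟩ := ht
  have Hbr : ∀ c, pvRole sws c ≠ .raw → c ∈ pvBr := pvRole_ne_raw sws hs
  have hvdec : ∃ v k, m = v ++ k ∧
      (v = ['_', '_'] ∨ ∃ b ∈ vb, v = [b] ∨ v = ['_', b]) := by
    rcases pvVShape Hbr hv with ⟨k, rfl⟩ | ⟨b, k, rfl, hbblk, hbbr⟩ | ⟨b, k, rfl, hbblk, hbbr⟩
    · exact ⟨['_', '_'], k, by simp, Or.inl rfl⟩
    · exact ⟨['_', b], k, by simp,
        Or.inr ⟨b, hvb b hbbr ((pvRole_blk_iff sws b).mp hbblk).1, Or.inr rfl⟩⟩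
    · exact ⟨[b], k, by simp,
        Or.inr ⟨b, hvb b hbbr ((pvRole_blk_iff sws b).mp hbblk).1, Or.inl rfl⟩⟩
  obtain ⟨v, k, hm, hvmem⟩ := hvdec
  have hudec : ∃ u, s = u ++ pvSwapChar o :: m ∧
      (u = pvSent ∨ ∃ b ∈ ub, u = b :: pvTempl ∨ u = b :: '_' :: pvTempl) := by
    rcases hform with hseq | ⟨b0, hb0blk, hb0ne, hb0br, hseq | hseq⟩
    · exact ⟨pvSent, hseq, Or.inl rfl⟩
    · exact ⟨b0 :: pvTempl, by simpa using hseq,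
        Or.inr ⟨b0, hub b0 hb0br ((pvRole_blk_iff sws b0).mp hb0blk).1 hb0ne, Or.inl rfl⟩⟩
    · exact ⟨b0 :: '_' :: pvTempl, by simpa using hseq,
        Or.inr ⟨b0, hub b0 hb0br ((pvRole_blk_iff sws b0).mp hb0blk).1 hb0ne, Or.inr rfl⟩⟩
  obtain ⟨u, hsu, humem⟩ := hudec
  apply hD
  refine ⟨u ++ X :: v, hmem _ (mem_pvMkPats ub vb humem hvmem), ?_⟩
  rw [hX] at hsu
  have hpre : (u ++ X :: v) <+: s := ⟨k, by rw [hsu, hm]; simp⟩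
  exact hpre.isInfix.trans hs'.isInfix

-- ---------- phase 1 ----------
def pvAChars (cs : List Char) : List Char :=
  PySem.Chars.replace (PySem.Chars.replace (PySem.Chars.replace (PySem.Chars.replace
    (PySem.Chars.replace (PySem.Chars.replace
      (PySem.Chars.replace (PySem.Chars.replace (PySem.Chars.replace (PySem.Chars.replace
        (PySem.Chars.replace (PySem.Chars.replace
          cs ['('] (pvBlock '(')) [')'] (pvBlock ')')) ['['] (pvBlock '[')) [']'] (pvBlock ']'))
        ['{'] (pvBlock '{')) ['}'] (pvBlock '}'))
    (pvBlock '(') [')']) (pvBlock ')') ['(']) (pvBlock '[') [']']) (pvBlock ']') ['['])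
    (pvBlock '{') ['}']) (pvBlock '}') ['{']

lemma pvPoint (c : Char) :
    List.flatMap (fun x => if x = '}' then pvBlock '}' else [x])
      (List.flatMap (fun x => if x = '{' then pvBlock '{' else [x])
        (List.flatMap (fun x => if x = ']' then pvBlock ']' else [x])
          (List.flatMap (fun x => if x = '[' then pvBlock '[' else [x])
            (List.flatMap (fun x => if x = ')' then pvBlock ')' else [x])
              (if c = '(' then pvBlock '(' else [c])))))
    = pvChunk (pvRole []) c := by
  by_cases h1 : c = '(' ; · subst h1; decide
  by_cases h2 : c = ')' ; · subst h2; decide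
  by_cases h3 : c = '[' ; · subst h3; decide
  by_cases h4 : c = ']' ; · subst h4; decide
  by_cases h5 : c = '{' ; · subst h5; decide
  by_cases h6 : c = '}' ; · subst h6; decide
  have hbr : c ∉ pvBr := by simp [pvBr, h1, h2, h3, h4, h5, h6]
  have hrole : pvRole [] c = .raw := (pvRole_raw_iff [] c).mpr ⟨by simp, hbr⟩
  simp [h1, h2, h3, h4, h5, h6, pvChunk, hrole]

lemma pvPhase1 (cs : List Char) :
    PySem.Chars.replace (PySem.Chars.replace (PySem.Chars.replace (PySem.Chars.replace
      (PySem.Chars.replace (PySem.Chars.replace cs ['('] (pvBlock '(')) [')'] (pvBlock ')'))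
      ['['] (pvBlock '[')) [']'] (pvBlock ']')) ['{'] (pvBlock '{')) ['}'] (pvBlock '}')
    = pvImg (pvRole []) cs := by
  simp only [pvReplace_eq, pvRep_single]
  induction cs with
  | nil => simp [pvImg]
  | cons c t ih =>
    simp only [List.flatMap_cons, List.flatMap_append]
    rw [ih]
    have himg : pvImg (pvRole []) (c :: t) = pvChunk (pvRole []) c ++ pvImg (pvRole []) t := by
      simp [pvImg]
    rw [himg, pvPoint c]

lemma pvImg_final (cs : List Char) :
    pvImg (pvRole ['}', '{', ']', '[', ')', '(']) cs = cs.map pvSwapChar := by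
  induction cs with
  | nil => simp [pvImg]
  | cons c t ih =>
    have himg : pvImg (pvRole ['}', '{', ']', '[', ')', '(']) (c :: t)
        = pvChunk (pvRole ['}', '{', ']', '[', ')', '(']) c
          ++ pvImg (pvRole ['}', '{', ']', '[', ')', '(']) t := by
      simp [pvImg]
    rw [himg, List.map_cons, ih]
    have hch : pvChunk (pvRole ['}', '{', ']', '[', ')', '(']) c = [pvSwapChar c] := by
      by_cases hc : c ∈ pvBr
      · fin_cases hc <;> rfl
      · have hrole : pvRole ['}', '{', ']', '[', ')', '('] c = .raw := by
          rw [pvRole_raw_iff]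
          exact ⟨fun h => hc (by fin_cases h <;> decide), hc⟩
        simp [pvChunk, hrole, pvSwap_id hc]
    rw [hch]
    rfl

lemma pvMain (cs : List Char) (hD : ¬ ∃ p ∈ pvPats, p <:+: cs) :
    pvAChars cs = cs.map pvSwapChar := by
  have hsub1 : (['('] : List Char) ⊆ pvBr := by intro a ha; fin_cases ha <;> decide
  have hsub2 : ([')', '('] : List Char) ⊆ pvBr := by intro a ha; fin_cases ha <;> decide
  have hsub3 : (['[', ')', '('] : List Char) ⊆ pvBr := by intro a ha; fin_cases ha <;> decide
  have hsub4 : ([']', '[', ')', '('] : List Char) ⊆ pvBr := by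
    intro a ha; fin_cases ha <;> decide
  have hsub5 : (['{', ']', '[', ')', '('] : List Char) ⊆ pvBr := by
    intro a ha; fin_cases ha <;> decide
  have e1 := pvStep [] (List.nil_subset _) '(' (by decide) (by decide) cs
    (fun h => absurd h (by decide))
  rw [show pvSwapChar '(' = ')' from rfl] at e1
  have e2 := pvStep ['('] hsub1 ')' (by decide) (by decide) cs
    (fun _ => pvTrig_to_D ['('] hsub1 ')' '(' rfl ['[', ']', '{', '}'] [')', '[', ']', '{', '}']
      (by intro b hb h1 h2; fin_cases hb <;> simp_all)
      (by intro b hb h1; fin_cases hb <;> simp_all)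
      (fun p hp => List.mem_append_left _ (List.mem_append_left _ hp)) cs hD)
  rw [show pvSwapChar ')' = '(' from rfl] at e2
  have e3 := pvStep [')', '('] hsub2 '[' (by decide) (by decide) cs
    (fun h => absurd h (by decide))
  rw [show pvSwapChar '[' = ']' from rfl] at e3
  have e4 := pvStep ['[', ')', '('] hsub3 ']' (by decide) (by decide) cs
    (fun _ => pvTrig_to_D ['[', ')', '('] hsub3 ']' '[' rfl ['{', '}'] [']', '{', '}']
      (by intro b hb h1 h2; fin_cases hb <;> simp_all)
      (by intro b hb h1; fin_cases hb <;> simp_all)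
      (fun p hp => List.mem_append_left _ (List.mem_append_right _ hp)) cs hD)
  rw [show pvSwapChar ']' = '[' from rfl] at e4
  have e5 := pvStep [']', '[', ')', '('] hsub4 '{' (by decide) (by decide) cs
    (fun h => absurd h (by decide))
  rw [show pvSwapChar '{' = '}' from rfl] at e5
  have e6 := pvStep ['{', ']', '[', ')', '('] hsub5 '}' (by decide) (by decide) cs
    (fun _ => pvTrig_to_D ['{', ']', '[', ')', '('] hsub5 '}' '{' rfl [] ['}']
      (by intro b hb h1 h2; fin_cases hb <;> simp_all)
      (by intro b hb h1; fin_cases hb <;> simp_all)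
      (fun p hp => List.mem_append_right _ hp) cs hD)
  rw [show pvSwapChar '}' = '{' from rfl] at e6
  unfold pvAChars
  rw [pvPhase1]
  simp only [pvBlock]
  simp only [pvReplace_eq]
  rw [e1, e2, e3, e4, e5, e6, pvImg_final]

lemma pyA_toList (text : String) :
    (adjust_rtl_punctuation_py text).toList = pvAChars text.toList := by
  have h0 : adjust_rtl_punctuation_py text =
    PySem.Str.replace (PySem.Str.replace (PySem.Str.replace (PySem.Str.replace
      (PySem.Str.replace (PySem.Str.replace
        (PySem.Str.replace (PySem.Str.replace (PySem.Str.replace (PySem.Str.replace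
          (PySem.Str.replace (PySem.Str.replace
            text "(" ("__TEMP_" ++ "(" ++ "__")) ")" ("__TEMP_" ++ ")" ++ "__"))
            "[" ("__TEMP_" ++ "[" ++ "__")) "]" ("__TEMP_" ++ "]" ++ "__"))
            "{" ("__TEMP_" ++ "{" ++ "__")) "}" ("__TEMP_" ++ "}" ++ "__"))
        ("__TEMP_" ++ "(" ++ "__") ")") ("__TEMP_" ++ ")" ++ "__") "(")
        ("__TEMP_" ++ "[" ++ "__") "]") ("__TEMP_" ++ "]" ++ "__") "[")
        ("__TEMP_" ++ "{" ++ "__") "}") ("__TEMP_" ++ "}" ++ "__") "{" := rfl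
  rw [h0]
  simp only [PySem.Str.toList_replace]
  rw [show ("__TEMP_" ++ "(" ++ "__").toList = pvBlock '(' from by decide,
    show ("__TEMP_" ++ ")" ++ "__").toList = pvBlock ')' from by decide,
    show ("__TEMP_" ++ "[" ++ "__").toList = pvBlock '[' from by decide,
    show ("__TEMP_" ++ "]" ++ "__").toList = pvBlock ']' from by decide,
    show ("__TEMP_" ++ "{" ++ "__").toList = pvBlock '{' from by decide,
    show ("__TEMP_" ++ "}" ++ "__").toList = pvBlock '}' from by decide,
    show ("(" : String).toList = ['('] from rfl,
    show (")" : String).toList = [')'] from rfl,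
    show ("[" : String).toList = ['['] from rfl,
    show ("]" : String).toList = [']'] from rfl,
    show ("{" : String).toList = ['{'] from rfl,
    show ("}" : String).toList = ['}'] from rfl]
  rfl

-- ===== VERDICT =====
theorem adjust_rtl_punctuation_py_spec : Claim_equal_adjust_rtl_punctuation_py := by
  intro text _hDom hPre
  show adjust_rtl_punctuation_py text = adjust_rtl_punctuation_py_alt text
  apply String.toList_inj.mp
  rw [pyA_toList]
  show pvAChars text.toList = (adjust_rtl_punctuation_py_alt text).toList
  rw [adjust_rtl_punctuation_py_alt, String.toList_ofList]
  refine pvMain text.toList (fun hex => ?_)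
  have := pvD_of_pat hex
  rw [Pre_adjust_rtl_punctuation_py] at hPre
  rw [hPre] at this
  exact absurd this (by decide)
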